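-- pv_equiv track=rewrite | github.com/SL1dee36/My-Programming-Exam-Solutions | T-Bank-exam/snowfall.py | check_snow_log
-- ===== SOURCE A (Python) =====
-- def check_snow_log(n, snow_depths):
--
--     snowfall = [1] * n
--
--     for i in range(n):
--         if snow_depths[i] != -1:
--             if snow_depths[i] < sum(snowfall[:i]):
--                 return "NO"
--             snowfall[i] = snow_depths[i] - sum(snowfall[:i])
--
--     return "YES\n" + " ".join(map(str, snowfall))
-- ===== SOURCE B (Python) =====
-- def check_snow_log(n, snow_depths):
--     pieces = []
--     total = 0
--     for _, d in zip(range(n), snow_depths):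
--         x = 1 if d == -1 else d - total
--         if x < 0:
--             return "NO"
--         pieces.append(str(x))
--         total += x
--     return "YES\n" + " ".join(pieces)
-- ===== Notes on version B (the rewrite author's own statement) =====
-- stated objective: alternative
-- what changed: B pairs range(n) with the depths via zip and folds over the values with a running prefix sum, building the output strings as it goes, instead of A's index loop that re-sums snowfall[:i] at every step and mutates a preallocated [1]*n; Pre_ excludes n > len(snow_depths), where A raises IndexError unless an early 'NO' fires first (B returns that same 'NO' there).
-- outside the precondition, e.g. on check_snow_log(2, [-5]): A returns 'NO', B returns 'NO'
import Mathlib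
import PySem

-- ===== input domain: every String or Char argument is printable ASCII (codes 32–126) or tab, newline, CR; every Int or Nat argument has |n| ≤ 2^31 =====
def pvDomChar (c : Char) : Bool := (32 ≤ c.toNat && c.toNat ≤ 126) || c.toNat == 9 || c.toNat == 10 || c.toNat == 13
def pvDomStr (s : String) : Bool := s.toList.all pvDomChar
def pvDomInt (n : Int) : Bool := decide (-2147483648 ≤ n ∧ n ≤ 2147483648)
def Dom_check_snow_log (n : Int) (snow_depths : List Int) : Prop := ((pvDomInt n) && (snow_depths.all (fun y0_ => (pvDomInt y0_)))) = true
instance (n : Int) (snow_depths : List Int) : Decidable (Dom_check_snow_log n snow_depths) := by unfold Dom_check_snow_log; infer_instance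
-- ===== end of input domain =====

-- B zips range(n) with the depths and folds once with a running prefix sum (building the output strings directly), instead of A's index loop re-summing snowfall[:i] each step.


-- ===== PORT A =====
-- for i in range(n): resum snowfall[:i], early return "NO", set snowfall[i] in place
def checkA_go (depths : List Int) : List Int → List Int → Option (List Int)
  | snowfall, [] => some snowfall
  | snowfall, i :: rest =>
    let d := PySem.List.pyGetD depths i 0      -- in range under Pre_
    if d ≠ -1 then
      let pre := (PySem.List.slice snowfall none (some i)).sum
      if d < pre then none
      else checkA_go depths (PySem.List.pySetD snowfall i (d - pre)) rest
    else checkA_go depths snowfall rest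

def check_snow_log (n : Int) (snow_depths : List Int) : String :=
  match checkA_go snow_depths (PySem.List.pyRepeat [1] n) (PySem.List.pyRange 0 n 1) with
  | none => "NO"
  | some s => "YES\n" ++ PySem.Str.join " " (s.map PySem.Int.toStr)

-- ===== PORT B =====
-- structural recursion over zip(range(n), depths); running total; output strings built as we go
def checkB_go : List (Int × Int) → Int → List String → Option (List String)
  | [], _, pieces => some pieces
  | (_, d) :: rest, total, pieces =>
    let x := if d = -1 then 1 else d - total
    if x < 0 then none
    else checkB_go rest (total + x) (pieces ++ [PySem.Int.toStr x])

def check_snow_log_alt (n : Int) (snow_depths : List Int) : String :=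
  match checkB_go ((PySem.List.pyRange 0 n 1).zip snow_depths) 0 [] with
  | none => "NO"
  | some pieces => "YES\n" ++ PySem.Str.join " " pieces

-- ===== PRECONDITION & SPEC =====
-- Pre_ excludes n > len(snow_depths): there A raises IndexError unless an early "NO" fires first
-- (B returns that same "NO" there too).
def Pre_check_snow_log (n : Int) (snow_depths : List Int) : Prop := n ≤ (snow_depths.length : Int)
instance (n : Int) (snow_depths : List Int) : Decidable (Pre_check_snow_log n snow_depths) := by unfold Pre_check_snow_log; infer_instance
def pvWitness_check_snow_log : Int × List Int := (3, [4, -1, 7])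

def Spec_check_snow_log (n : Int) (snow_depths : List Int) (out : String) : Prop := out = check_snow_log_alt n snow_depths
instance (n : Int) (snow_depths : List Int) (out : String) : Decidable (Spec_check_snow_log n snow_depths out) := by unfold Spec_check_snow_log; infer_instance

-- ===== CLAIM (what is proved, stated in full; the proofs are below) =====
def Claim_equal_check_snow_log : Prop := ∀ (n : Int) (snow_depths : List Int), Dom_check_snow_log n snow_depths → Pre_check_snow_log n snow_depths → Spec_check_snow_log n snow_depths (check_snow_log n snow_depths)

-- ===== LEMMAS AND PROOFS =====

-- Invariant: after the first `done.length` indices, A's array is `done ++ replicate m 1`, its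
-- slice-sum equals B's running total `done.sum`, and B's remaining input is the rest of the zip;
-- A's result mapped through str equals B's result.
lemma go_eq (depths : List Int) (n : Int) (hn : n ≤ (depths.length : Int)) :
    ∀ (m : Nat) (done : List Int), (done.length : Int) + m = n →
    (checkA_go depths (done ++ List.replicate m 1)
        (PySem.List.pyRange (done.length : Int) n 1)).map (·.map PySem.Int.toStr)
      = checkB_go ((PySem.List.pyRange (done.length : Int) n 1).zip (depths.drop done.length))
          done.sum (done.map PySem.Int.toStr) := by
  intro m
  induction m with
  | zero =>
    intro done h
    rw [PySem.List.pyRange_one_eq_nil (by omega)]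
    simp [checkA_go, checkB_go]
  | succ m ih =>
    intro done h
    have hk : done.length < depths.length := by omega
    rw [PySem.List.pyRange_one_cons (by omega),
      List.drop_eq_getElem_cons hk, List.zip_cons_cons]
    have hA : PySem.List.pyGetD depths (done.length : Int) 0 = depths[done.length] := by
      rw [PySem.List.pyGetD_natCast]
      exact List.getD_eq_getElem _ _ hk
    simp only [checkA_go, checkB_go, hA]
    set d := depths[done.length] with hd
    have hslice : PySem.List.slice (done ++ List.replicate (m+1) 1) none (some (done.length : Int))
        = done := by
      rw [PySem.List.slice_to_natCast]; simp
    by_cases hdm : d = -1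
    · rw [if_neg (not_not_intro hdm)]
      simp only [if_pos hdm]
      rw [if_neg (by norm_num)]
      have h1 : done ++ List.replicate (m+1) 1 = (done ++ [1]) ++ List.replicate m 1 := by
        simp [List.replicate_succ]
      have := ih (done ++ [(1:Int)]) (by simp; omega)
      rw [h1]
      simpa using this
    · rw [if_pos hdm, hslice]
      simp only [if_neg hdm]
      by_cases hlt : d < done.sum
      · rw [if_pos hlt, if_pos (by omega)]
        simp
      · rw [if_neg hlt, if_neg (by omega)]
        have hset : PySem.List.pySetD (done ++ List.replicate (m+1) 1) (done.length : Int) (d - done.sum)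
            = (done ++ [d - done.sum]) ++ List.replicate m 1 := by
          rw [PySem.List.pySetD_natCast]
          simp [List.replicate_succ]
        have := ih (done ++ [d - done.sum]) (by simp; omega)
        rw [hset]
        simpa using this

-- ===== VERDICT (by name: the statement is the Claim_ definition above) =====
theorem check_snow_log_spec : Claim_equal_check_snow_log := by
  intro n depths _ hnl
  unfold Spec_check_snow_log check_snow_log check_snow_log_alt
  by_cases hn0 : 0 ≤ n
  · rw [PySem.List.pyRepeat_singleton]
    have h := go_eq depths n hnl n.toNat [] (by simpa using (Int.toNat_of_nonneg hn0))
    simp only [List.length_nil, Nat.cast_zero, List.nil_append, List.sum_nil, List.map_nil,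
      List.drop_zero] at h
    cases hA : checkA_go depths (List.replicate n.toNat 1) (PySem.List.pyRange 0 n 1) with
    | none => rw [hA] at h; simp at h; rw [← h]
    | some s => rw [hA] at h; simp at h; rw [← h]
  · rw [PySem.List.pyRange_one_eq_nil (by omega), PySem.List.pyRepeat_singleton,
      (by omega : n.toNat = 0)]
    simp [checkA_go, checkB_go]
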